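-- pv_equiv track=rewrite | github.com/tbdye/amigactl | client/amigactl/shell.py | _join_amiga_path
-- ===== SOURCE A (Python) =====
-- def _join_amiga_path(base, relative):
--     """Join an Amiga base directory path with a relative path.
--
--     Handles Amiga conventions:
--     - base must end with ':' or '/' (it's a directory)
--     - leading '/' in relative means "go up one level"
--     - multiple leading '/' means go up multiple levels
--
--     Examples:
--         _join_amiga_path("SYS:S", "Startup-Sequence")
--             -> "SYS:S/Startup-Sequence"
--         _join_amiga_path("SYS:", "S")
--             -> "SYS:S"
--         _join_amiga_path("Work:Projects/foo", "/bar")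
--             -> "Work:Projects/bar"
--         _join_amiga_path("Work:Projects", "//test")
--             -> "Work:test"
--         _join_amiga_path("Work:", "/test")
--             -> "Work:test"    (can't go above volume root)
--     """
--     # Normalize base: ensure it ends with ':' or '/'
--     if not base.endswith(":") and not base.endswith("/"):
--         base = base + "/"
--
--     # Handle leading '/' (parent directory navigation)
--     while relative.startswith("/"):
--         relative = relative[1:]
--         # Strip one path component from base
--         if base.endswith("/"):
--             base = base[:-1]  # remove trailing /
--             # Find the previous separator
--             slash = base.rfind("/")
--             colon = base.rfind(":")
--             sep = max(slash, colon)
--             if sep >= 0: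
--                 base = base[:sep + 1]
--             # else: already at volume root, can't go higher
--         # If base ends with ':', we're at volume root -- stay there
--
--     if not relative:
--         # Pure parent navigation, return the base
--         if base.endswith(":"):
--             return base
--         return base.rstrip("/")
--
--     # Join
--     if base.endswith(":") or base.endswith("/"):
--         return base + relative
--     return base + "/" + relative
-- ===== SOURCE B (Python) =====
-- def _join_amiga_path(base, relative):
--     """Join an Amiga base directory path with a relative path.
--
--     Alternative strategy: parse base once into a stack of separator-terminated
--     pieces, pop one piece per leading '/' in relative, then rebuild and join.
--     """
--     # Normalize base: ensure it ends with ':' or '/'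
--     if not base.endswith(":") and not base.endswith("/"):
--         base = base + "/"
--
--     # Count leading '/' in relative (levels to go up) and strip them
--     k = 0
--     while k < len(relative) and relative[k] == "/":
--         k += 1
--     relative = relative[k:]
--
--     # Parse base into pieces each ending with its separator, plus a
--     # separator-free tail (empty right after normalization)
--     pieces = []
--     cur = ""
--     for ch in base:
--         cur += ch
--         if ch == ":" or ch == "/":
--             pieces.append(cur)
--             cur = ""
--     tail = cur
--
--     # Pop one '/'-terminated piece per level; a ':'-terminated top means
--     # volume root -- stay there
--     for _ in range(k):
--         if not tail and pieces and pieces[-1].endswith("/"):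
--             last = pieces.pop()
--             if not pieces:
--                 tail = last[:-1]
--     base = "".join(pieces) + tail
--
--     if not relative:
--         if base.endswith(":"):
--             return base
--         return base.rstrip("/")
--     if base.endswith(":") or base.endswith("/"):
--         return base + relative
--     return base + "/" + relative
-- ===== Notes on version B (the rewrite author's own statement) =====
-- stated objective: alternative
-- what changed: A walks up per leading '/' by repeatedly rescanning base with rfind('/')/rfind(':'); B parses base once into a stack of separator-terminated pieces and pops one piece per leading slash in O(1), rebuilding the path at the end.
import Mathlib
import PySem

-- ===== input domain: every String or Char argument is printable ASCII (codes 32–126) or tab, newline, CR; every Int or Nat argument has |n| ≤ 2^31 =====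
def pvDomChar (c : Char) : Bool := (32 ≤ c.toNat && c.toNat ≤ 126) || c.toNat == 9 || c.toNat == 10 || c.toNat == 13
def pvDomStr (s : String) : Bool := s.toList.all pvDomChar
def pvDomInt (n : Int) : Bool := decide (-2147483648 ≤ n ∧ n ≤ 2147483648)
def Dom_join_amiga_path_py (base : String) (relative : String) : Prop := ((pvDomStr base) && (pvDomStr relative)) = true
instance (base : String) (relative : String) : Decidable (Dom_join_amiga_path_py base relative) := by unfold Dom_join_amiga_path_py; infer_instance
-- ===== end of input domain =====

-- B replaces A's repeated rfind-based parent navigation by parsing base once into a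
-- stack of separator-terminated pieces and popping one piece per leading '/' (objective:
-- alternative); same return value everywhere, neither version mutates its arguments.

-- ===== PORT A =====
-- exact port of Python str.rstrip("/"): drop '/' characters from the right
def pvRstripSlash (s : List Char) : List Char :=
  (s.reverse.dropWhile (fun c => c == '/')).reverse

-- one iteration of A's while-loop body acting on base
def pvAStep (b : List Char) : List Char :=
  if PySem.Chars.endswith b ['/'] then
    let b' := PySem.Chars.slice b none (some (-1))      -- base = base[:-1]
    let slash := PySem.Chars.rfind b' ['/']
    let colon := PySem.Chars.rfind b' [':']
    let sep := max slash colon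
    if 0 ≤ sep then PySem.Chars.slice b' none (some (sep + 1)) else b'
  else b

-- termination helper for the while-loop: startswith '/' means a '/'-headed list
theorem pv_startswith_slash {r : List Char} (h : PySem.Chars.startswith r ['/'] = true) :
    ∃ t, r = '/' :: t := by
  rw [PySem.Chars.startswith, List.isPrefixOf_iff_prefix] at h
  cases r with
  | nil => simp at h
  | cons a t => simp at h; exact ⟨t, by rw [h]⟩

-- A's while-loop: consume leading '/'s of relative, stepping base each time
def pvALoop (b : List Char) (r : List Char) : List Char × List Char :=
  if h : PySem.Chars.startswith r ['/'] = true then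
    pvALoop (pvAStep b) (PySem.Chars.slice r (some 1) none)   -- relative = relative[1:]
  else (b, r)
termination_by r.length
decreasing_by
  obtain ⟨t, rfl⟩ := pv_startswith_slash h
  simp [PySem.List.slice_from_one]

def pvJoinA (b0 r0 : List Char) : List Char :=
  let b1 := if !(PySem.Chars.endswith b0 [':']) && !(PySem.Chars.endswith b0 ['/']) then
    b0 ++ ['/'] else b0
  let p := pvALoop b1 r0
  let b := p.1
  let r := p.2
  if r = [] then
    (if PySem.Chars.endswith b [':'] then b else pvRstripSlash b)
  else if PySem.Chars.endswith b [':'] || PySem.Chars.endswith b ['/'] then b ++ r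
  else b ++ ['/'] ++ r

def join_amiga_path_py (base : String) (relative : String) : String :=
  String.ofList (pvJoinA base.toList relative.toList)

-- ===== PORT B =====
-- B's parse-loop body: accumulate chars, closing a piece at each ':' or '/'
def pvStepB (st : List (List Char) × List Char) (ch : Char) : List (List Char) × List Char :=
  let cur := st.2 ++ [ch]
  if ch == ':' || ch == '/' then (st.1 ++ [cur], []) else (st.1, cur)

-- B's pop: drop the top '/'-terminated piece; a ':'-terminated top (volume root) stays
def pvPopB (st : List (List Char) × List Char) : List (List Char) × List Char :=
  if st.2 = [] then
    match st.1.getLast? with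
    | some lastp =>
        if PySem.Chars.endswith lastp ['/'] then
          let ps' := st.1.dropLast
          if ps' = [] then (ps', lastp.dropLast) else (ps', [])
        else st
    | none => st
  else st

def pvJoinB (b0 r0 : List Char) : List Char :=
  let b1 := if !(PySem.Chars.endswith b0 [':']) && !(PySem.Chars.endswith b0 ['/']) then
    b0 ++ ['/'] else b0
  let k := (r0.takeWhile (fun c => c == '/')).length
  let r := r0.drop k
  let st0 := b1.foldl pvStepB ([], [])
  let st := (List.range k).foldl (fun s _ => pvPopB s) st0
  let b := st.1.flatten ++ st.2
  if r = [] then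
    (if PySem.Chars.endswith b [':'] then b else pvRstripSlash b)
  else if PySem.Chars.endswith b [':'] || PySem.Chars.endswith b ['/'] then b ++ r
  else b ++ ['/'] ++ r

def join_amiga_path_py_alt (base : String) (relative : String) : String :=
  String.ofList (pvJoinB base.toList relative.toList)

-- ===== PRECONDITION & SPEC =====
def Spec_join_amiga_path_py (base : String) (relative : String) (out : String) : Prop := out = join_amiga_path_py_alt base relative
instance (base : String) (relative : String) (out : String) : Decidable (Spec_join_amiga_path_py base relative out) := by unfold Spec_join_amiga_path_py; infer_instance

-- ===== CLAIM (what is proved, stated in full; the proofs are below) =====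
def Claim_equal_join_amiga_path_py : Prop := ∀ (base : String) (relative : String), Dom_join_amiga_path_py base relative → Spec_join_amiga_path_py base relative (join_amiga_path_py base relative)

-- ===== LEMMAS AND PROOFS =====

def pvSep (c : Char) : Bool := c == ':' || c == '/'

def pvWF (st : List (List Char) × List Char) : Prop :=
  (∀ p ∈ st.1, ∃ w c, (∀ x ∈ w, pvSep x = false) ∧ pvSep c = true ∧ p = w ++ [c]) ∧
  (∀ x ∈ st.2, pvSep x = false)

def pvRebuild (st : List (List Char) × List Char) : List Char := st.1.flatten ++ st.2

theorem pv_ends_concat (t : List Char) (a c : Char) :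
    PySem.Chars.endswith (t ++ [a]) [c] = (a == c) := by
  rw [Bool.eq_iff_iff, PySem.Chars.endswith_iff, beq_iff_eq]
  constructor
  · rintro ⟨u, hu⟩
    have := congrArg List.getLast? hu
    simp at this; exact this.symm
  · rintro rfl; exact ⟨t, rfl⟩

theorem pv_ends_nil (c : Char) : PySem.Chars.endswith [] [c] = false := rfl

theorem pv_prefix_single (d : Char) (l : List Char) :
    [d].isPrefixOf l = true ↔ l.head? = some d := by
  rw [List.isPrefixOf_iff_prefix]; cases l <;> simp [eq_comm]

theorem pv_go_none (s : List Char) (d : Char) (k : Nat)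
    (h : ∀ j, j ≤ k → s[j]? ≠ some d) : PySem.Chars.rfind.go s [d] k = -1 := by
  induction k with
  | zero =>
    simp only [PySem.Chars.rfind.go]
    rw [if_neg]
    intro hp
    rw [pv_prefix_single] at hp
    exact h 0 (le_refl 0) (by rw [← List.head?_eq_getElem?]; exact hp)
  | succ n ih =>
    simp only [PySem.Chars.rfind.go]
    rw [if_neg, ih (fun j hj => h j (Nat.le_succ_of_le hj))]
    intro hp
    rw [pv_prefix_single, List.head?_drop] at hp
    exact h (n+1) (le_refl _) hp

theorem pv_go_ge (s : List Char) (d : Char) (k m : Nat)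
    (hm : s[m]? = some d) (hk : m ≤ k) : (m : Int) ≤ PySem.Chars.rfind.go s [d] k := by
  induction k with
  | zero =>
    interval_cases m
    simp only [PySem.Chars.rfind.go]
    rw [if_pos (by rw [pv_prefix_single, List.head?_eq_getElem?]; exact hm)]
    simp
  | succ n ih =>
    simp only [PySem.Chars.rfind.go]
    by_cases hp : [d].isPrefixOf (s.drop (n+1)) = true
    · rw [if_pos hp]; exact_mod_cast hk
    · rw [if_neg (by simpa using hp)]
      apply ih
      rcases Nat.lt_or_ge m (n+1) with h | h
      · omega
      · exfalso; apply hp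
        have : m = n+1 := by omega
        rw [pv_prefix_single, List.head?_drop, ← this]; exact hm

theorem pv_go_le (s : List Char) (d : Char) (k m : Nat)
    (h : ∀ j, m < j → j ≤ k → s[j]? ≠ some d) : PySem.Chars.rfind.go s [d] k ≤ (m : Int) := by
  induction k with
  | zero =>
    simp only [PySem.Chars.rfind.go]
    split <;> simp
  | succ n ih =>
    simp only [PySem.Chars.rfind.go]
    by_cases hp : [d].isPrefixOf (s.drop (n+1)) = true
    · rw [if_pos hp]
      rw [pv_prefix_single, List.head?_drop] at hp
      have : ¬ (m < n+1) := fun hc => h (n+1) hc (le_refl _) hp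
      push_cast; omega
    · rw [if_neg (by simpa using hp)]
      exact ih (fun j hj hjn => h j hj (Nat.le_succ_of_le hjn))

theorem pv_no_d_after (u w : List Char) (c d : Char)
    (hw : ∀ x ∈ w, pvSep x = false) (hd : pvSep d = true) :
    ∀ j, u.length < j → (u ++ c :: w)[j]? ≠ some d := by
  intro j hj heq
  rw [List.getElem?_append_right (by omega)] at heq
  rcases Nat.exists_eq_add_of_lt hj with ⟨i, rfl⟩
  have h2 : u.length + i + 1 - u.length = i + 1 := by omega
  rw [h2, List.getElem?_cons_succ] at heq
  have := hw d (List.mem_of_getElem? heq)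
  rw [this] at hd; exact Bool.false_ne_true hd

theorem pv_rfind_none (s : List Char) (d : Char) (h : d ∉ s) :
    PySem.Chars.rfind s [d] = -1 := by
  rw [PySem.Chars.rfind]
  apply pv_go_none
  intro j _ hj
  exact h (List.mem_of_getElem? hj)

theorem pv_rfind_max (u w : List Char) (c : Char) (hc : pvSep c = true)
    (hw : ∀ x ∈ w, pvSep x = false) :
    max (PySem.Chars.rfind (u ++ c :: w) ['/']) (PySem.Chars.rfind (u ++ c :: w) [':'])
      = (u.length : Int) := by
  have hat : (u ++ c :: w)[u.length]? = some c := by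
    rw [List.getElem?_append_right (le_refl _)]
    simp
  have hlen : u.length ≤ (u ++ c :: w).length := by simp
  have hle : ∀ d, pvSep d = true → PySem.Chars.rfind.go (u ++ c :: w) [d] (u ++ c :: w).length ≤ (u.length : Int) := by
    intro d hd
    exact pv_go_le _ _ _ _ (fun j hj _ => pv_no_d_after u w c d hw hd j hj)
  have hge : (u.length : Int) ≤ PySem.Chars.rfind.go (u ++ c :: w) [c] (u ++ c :: w).length :=
    pv_go_ge _ _ _ _ hat hlen
  rw [PySem.Chars.rfind, PySem.Chars.rfind]
  rcases Bool.or_eq_true_iff.mp hc with h1 | h1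
  · -- c = ':'
    rw [beq_iff_eq] at h1; subst h1
    have := hle ':' (by decide)
    have h2 := hle '/' (by decide)
    omega
  · rw [beq_iff_eq] at h1; subst h1
    have := hle '/' (by decide)
    have h2 := hle ':' (by decide)
    omega

theorem pv_not_mem_of_sepfree {w : List Char} (hw : ∀ x ∈ w, pvSep x = false)
    {d : Char} (hd : pvSep d = true) : d ∉ w := by
  intro hmem; rw [hw d hmem] at hd; exact Bool.false_ne_true hd

theorem pv_ends_no_slash {s tl : List Char} (htl : ∀ x ∈ tl, pvSep x = false)
    (hne : tl ≠ []) : PySem.Chars.endswith (s ++ tl) ['/'] = false := by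
  rcases List.eq_nil_or_concat tl with rfl | ⟨t', a, rfl⟩
  · exact absurd rfl hne
  rw [List.concat_eq_append, ← List.append_assoc, pv_ends_concat]
  have := htl a (by simp)
  simp only [pvSep, Bool.or_eq_false_iff] at this
  exact this.2

theorem pv_parse_wf (s : List Char) :
    pvWF (s.foldl pvStepB ([], [])) ∧ pvRebuild (s.foldl pvStepB ([], [])) = s := by
  induction s using List.reverseRecOn with
  | nil => exact ⟨⟨by simp, by simp⟩, rfl⟩
  | append_singleton t c ih =>
    obtain ⟨⟨hps, htl⟩, hreb⟩ := ih
    rw [List.foldl_append]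
    rcases hfold : t.foldl pvStepB ([], []) with ⟨ps, tl⟩
    rw [hfold] at hps htl hreb
    simp only [pvRebuild] at hreb ⊢
    simp only [List.foldl_cons, List.foldl_nil]
    by_cases hc : (c == ':' || c == '/') = true
    · simp only [pvStepB, hc, if_pos]
      refine ⟨⟨?_, by simp⟩, ?_⟩
      · intro p hp
        rcases List.mem_append.mp hp with h | h
        · exact hps p h
        · simp at h; subst h
          exact ⟨tl, c, htl, hc, rfl⟩
      · simp [← hreb]
    · rw [Bool.not_eq_true] at hc
      simp only [pvStepB, hc, Bool.false_eq_true, if_false]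
      refine ⟨⟨hps, ?_⟩, ?_⟩
      · intro x hx
        rcases List.mem_append.mp hx with h | h
        · exact htl x h
        · simp at h; subst h; simpa [pvSep] using hc
      · simp [← hreb]

theorem pv_step_sim (st : List (List Char) × List Char) (hWF : pvWF st) :
    pvWF (pvPopB st) ∧ pvRebuild (pvPopB st) = pvAStep (pvRebuild st) := by
  obtain ⟨ps, tl⟩ := st
  obtain ⟨hps, htl⟩ := hWF
  simp only at hps htl
  by_cases htl0 : tl = []
  case neg =>
    have hpop : pvPopB (ps, tl) = (ps, tl) := by
      unfold pvPopB
      rw [if_neg htl0]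
    rw [hpop]
    refine ⟨⟨hps, htl⟩, ?_⟩
    simp only [pvRebuild, pvAStep]
    rw [pv_ends_no_slash htl htl0]
    simp
  case pos =>
    subst htl0
    rcases List.eq_nil_or_concat ps with rfl | ⟨qs, p, rfl⟩
    · refine ⟨⟨hps, htl⟩, ?_⟩
      have hpop : pvPopB ([], []) = (([] : List (List Char)), ([] : List Char)) := by
        simp [pvPopB]
      rw [hpop]
      show pvRebuild ([], []) = pvAStep (pvRebuild ([], []))
      have : pvRebuild (([] : List (List Char)), ([] : List Char)) = [] := rfl
      rw [this, pvAStep.eq_def, pv_ends_nil]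
      simp
    simp only [List.concat_eq_append] at hps ⊢
    obtain ⟨w, c, hw, hc, hp⟩ := hps p (by simp)
    by_cases hcs : c = '/'
    case neg =>
      have hcolon : c = ':' := by
        simp only [pvSep, Bool.or_eq_true_iff, beq_iff_eq] at hc
        rcases hc with h | h
        · exact h
        · exact absurd h hcs
      subst hcolon
      have hends : PySem.Chars.endswith p ['/'] = false := by
        rw [hp, pv_ends_concat]; decide
      have hpop : pvPopB (qs ++ [p], []) = (qs ++ [p], []) := by
        simp [pvPopB, hends]
      rw [hpop]
      refine ⟨⟨hps, htl⟩, ?_⟩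
      have hends' : PySem.Chars.endswith (pvRebuild (qs ++ [p], [])) ['/'] = false := by
        simp only [pvRebuild, List.append_nil, List.flatten_concat]
        rw [hp, ← List.append_assoc, pv_ends_concat]; decide
      rw [pvAStep.eq_def, hends']
      simp
    case pos =>
      subst hcs; subst hp
      have hends : PySem.Chars.endswith (w ++ ['/']) ['/'] = true := by
        rw [pv_ends_concat]; decide
      rcases List.eq_nil_or_concat qs with rfl | ⟨rs, q, rfl⟩
      · have hpop : pvPopB ([] ++ [w ++ ['/']], []) = ([], w) := by
          simp [pvPopB, hends]
        rw [hpop]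
        refine ⟨⟨by simp, hw⟩, ?_⟩
        have hreb : pvRebuild ([] ++ [w ++ ['/']], []) = w ++ ['/'] := by
          simp [pvRebuild]
        have hb' : PySem.Chars.slice (w ++ ['/']) none (some (-1)) = w := by
          rw [PySem.Chars.slice_eq_listSlice, PySem.List.slice_to_neg_one,
            List.dropLast_concat]
        rw [hreb, pvAStep.eq_def, hends]
        simp only [if_true, hb']
        rw [pv_rfind_none w '/' (pv_not_mem_of_sepfree hw (by decide)),
          pv_rfind_none w ':' (pv_not_mem_of_sepfree hw (by decide))]
        simp [pvRebuild]
      · simp only [List.concat_eq_append] at hps ⊢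
        have hpop : pvPopB ((rs ++ [q]) ++ [w ++ ['/']], []) = (rs ++ [q], []) := by
          simp [pvPopB, hends]
        rw [hpop]
        obtain ⟨w', c', hw', hc', hq⟩ := hps q (by simp)
        refine ⟨⟨?_, by simp⟩, ?_⟩
        · intro x hmem
          simp only at hmem
          exact hps x (List.mem_append_left _ hmem)
        have hreb : pvRebuild ((rs ++ [q]) ++ [w ++ ['/']], [])
            = ((rs ++ [q]).flatten ++ w) ++ ['/'] := by
          simp [pvRebuild]
        have hb' : PySem.Chars.slice (((rs ++ [q]).flatten ++ w) ++ ['/']) none (some (-1))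
            = (rs ++ [q]).flatten ++ w := by
          rw [PySem.Chars.slice_eq_listSlice, PySem.List.slice_to_neg_one,
            List.dropLast_concat]
        have hends2 : PySem.Chars.endswith (((rs ++ [q]).flatten ++ w) ++ ['/']) ['/'] = true := by
          rw [pv_ends_concat]; decide
        rw [hreb, pvAStep.eq_def, hends2]
        simp only [if_true, hb']
        have hu : (rs ++ [q]).flatten ++ w = (rs.flatten ++ w') ++ c' :: w := by
          rw [List.flatten_concat, hq]
          simp
        rw [hu, pv_rfind_max (rs.flatten ++ w') w c' hc' hw]
        rw [if_pos (by exact Int.natCast_nonneg _)]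
        have hcast : ((rs.flatten ++ w').length : Int) + 1 = (((rs.flatten ++ w').length + 1 : Nat) : Int) := by
          push_cast; ring
        rw [PySem.Chars.slice_eq_listSlice, hcast, PySem.List.slice_to_natCast]
        have hlen2 : (rs.flatten ++ w').length + 1 - (rs.flatten ++ w').length = 1 := by omega
        rw [List.take_append, List.take_of_length_le (by omega), hlen2]
        simp [pvRebuild, hq]

theorem pv_iter_sim (k : Nat) (st : List (List Char) × List Char) (hWF : pvWF st) :
    pvWF (pvPopB^[k] st) ∧ pvRebuild (pvPopB^[k] st) = pvAStep^[k] (pvRebuild st) := by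
  induction k generalizing st with
  | zero => exact ⟨hWF, rfl⟩
  | succ n ih =>
    obtain ⟨hWF', heq⟩ := pv_step_sim st hWF
    obtain ⟨hWF'', heq'⟩ := ih (pvPopB st) hWF'
    rw [Function.iterate_succ_apply, Function.iterate_succ_apply]
    exact ⟨hWF'', by rw [heq', heq]⟩

theorem pv_foldl_range {α : Type} (f : α → α) (k : Nat) (x : α) :
    (List.range k).foldl (fun s _ => f s) x = f^[k] x := by
  induction k generalizing x with
  | zero => rfl
  | succ n ih => rw [List.range_succ, List.foldl_append, ih, Function.iterate_succ_apply']; rfl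

theorem pv_aloop_eq (r b : List Char) :
    pvALoop b r = (pvAStep^[(r.takeWhile (fun c => c == '/')).length] b,
      r.drop (r.takeWhile (fun c => c == '/')).length) := by
  induction r generalizing b with
  | nil =>
    rw [pvALoop]
    simp [PySem.Chars.startswith, List.isPrefixOf]
  | cons c t ih =>
    by_cases hc : c = '/'
    · subst hc
      have hsw : PySem.Chars.startswith ('/' :: t) ['/'] = true := by
        rw [PySem.Chars.startswith, List.isPrefixOf_iff_prefix]
        simp
      rw [pvALoop, dif_pos hsw]
      rw [PySem.Chars.slice_eq_listSlice, PySem.List.slice_from_one, List.tail_cons]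
      rw [ih]
      simp [Function.iterate_succ_apply]
    · have hsw : PySem.Chars.startswith (c :: t) ['/'] = false := by
        rw [PySem.Chars.startswith]
        rw [Bool.eq_false_iff]
        intro hp
        rw [List.isPrefixOf_iff_prefix] at hp
        simp at hp
        exact hc hp.symm
      rw [pvALoop, dif_neg (by rw [hsw]; exact Bool.false_ne_true)]
      have : (c :: t).takeWhile (fun c => c == '/') = [] := by
        simp [hc]
      rw [this]
      simp

theorem pv_main (b r : List Char) : pvJoinA b r = pvJoinB b r := by
  unfold pvJoinA pvJoinB
  dsimp only
  set b1 := if !(PySem.Chars.endswith b [':']) && !(PySem.Chars.endswith b ['/']) then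
    b ++ ['/'] else b with hb1
  set k := (r.takeWhile (fun c => c == '/')).length with hk
  obtain ⟨hWF0, hreb0⟩ := pv_parse_wf b1
  have hfold : (List.range k).foldl (fun s _ => pvPopB s) (b1.foldl pvStepB ([], []))
      = pvPopB^[k] (b1.foldl pvStepB ([], [])) := pv_foldl_range pvPopB k _
  obtain ⟨_, hiter⟩ := pv_iter_sim k (b1.foldl pvStepB ([], [])) hWF0
  rw [hreb0] at hiter
  rw [pv_aloop_eq, hfold]
  simp only [pvRebuild] at hiter
  rw [hiter]

-- ===== VERDICT (by name: the statement is the Claim_ definition above) =====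
theorem join_amiga_path_py_spec : Claim_equal_join_amiga_path_py := by
  intro base relative _
  unfold Spec_join_amiga_path_py join_amiga_path_py join_amiga_path_py_alt
  rw [pv_main]
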